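-- pv_equiv track=rewrite | github.com/kpalaciosm02/Proyecto-1-Intro-y-Taller | master.py | nextKey
-- ===== SOURCE A (Python) =====
-- def aLista(x):
--     if not isinstance(x, list):
--         if x < 10:
--             return [x]
--         return aLista(x//10)+[x%10]
--     else:
--         return x
--
-- def nextKey(x):
--     #esta funcion solo genera apartir de la llave x en binario, las siguientes llaves a utilizar
--     #^ es el simbolo para xor predeterminado en python
--     xLista=aLista(x)
--     xLista=[0]*(8-len(xLista))+xLista
--     primerxor=xLista[7]^xLista[5]
--     segundoxor=primerxor^xLista[3]
--     tercerxor=segundoxor^xLista[2]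
--
--     xListaTemp=[]
--     xListaTemp.append(tercerxor)
--     xListaTemp.extend(xLista[:-1])
--     xListaTempStr="".join([str(i) for i in xListaTemp])
--     #xNum=int(xListaTempStr)
--     return xListaTemp
-- ===== SOURCE B (Python) =====
-- def nextKey(x):
--     # most-significant-first digit extraction via a running power of ten
--     if x < 10:
--         ds = [x]
--     else:
--         p = 1
--         while p * 10 <= x:
--             p *= 10
--         ds = []
--         while p >= 1:
--             ds.append(x // p % 10)
--             p //= 10
--     pad = [0] * (8 - len(ds)) + ds
--     fb = pad[7] ^ pad[5] ^ pad[3] ^ pad[2]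
--     return [fb] + pad[:len(pad)-1]
-- ===== Notes on version B (the rewrite author's own statement) =====
-- stated objective: alternative
-- what changed: A's recursive least-significant-first digit split (recurse on the quotient, append the remainder, a list concatenation per level) is replaced by two iterative loops that first find the largest power of the base not exceeding x and then emit digits most-significant-first by dividing by that shrinking power, and the three chained XOR statements plus temp-list building are folded into one return expression.
import Mathlib
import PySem

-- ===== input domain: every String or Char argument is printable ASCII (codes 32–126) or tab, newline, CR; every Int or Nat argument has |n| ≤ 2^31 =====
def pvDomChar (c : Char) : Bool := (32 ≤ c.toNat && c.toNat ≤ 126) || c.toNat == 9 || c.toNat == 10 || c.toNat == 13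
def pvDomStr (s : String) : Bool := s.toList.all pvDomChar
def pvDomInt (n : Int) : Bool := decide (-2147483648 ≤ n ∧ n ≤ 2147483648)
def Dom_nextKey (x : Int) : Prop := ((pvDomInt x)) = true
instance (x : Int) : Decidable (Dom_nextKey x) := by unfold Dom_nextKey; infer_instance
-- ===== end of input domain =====

-- B replaces A's recursive least-significant-first digit split (recurse on x//10, append x%10)
-- by a most-significant-first extraction driven by a running power of ten, and folds the
-- chained XOR statements and temp-list building into one expression (objective: alternative).

-- ===== PORT A =====
-- aLista is only ever called on an Int here, so the isinstance(list) passthrough branch is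
-- unreachable under the typed signature and is omitted.
def aLista (x : Int) : List Int :=
  if x < 10 then [x]
  else aLista (PySem.Int.floordiv x 10) ++ [PySem.Int.mod x 10]
termination_by x.toNat
decreasing_by
  rw [PySem.Int.floordiv_eq_ediv_of_pos (by norm_num : (0:Int) < 10)]
  omega

def nextKey (x : Int) : List Int :=
  let xLista := aLista x
  let xLista := List.replicate (8 - xLista.length) 0 ++ xLista
  -- indices 7,5,3,2 are always in range since the padded list has length ≥ 8, so Python's
  -- xLista[i] never raises; ported with pyGetD (default never used)
  let primerxor := PySem.Int.bxor (PySem.List.pyGetD xLista 7 0) (PySem.List.pyGetD xLista 5 0)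
  let segundoxor := PySem.Int.bxor primerxor (PySem.List.pyGetD xLista 3 0)
  let tercerxor := PySem.Int.bxor segundoxor (PySem.List.pyGetD xLista 2 0)
  -- xListaTemp = [tercerxor] then extend with xLista[:-1]; the joined string is dead code
  tercerxor :: PySem.List.slice xLista none (some (-1))

-- ===== PORT B =====
-- first while loop of Source B: grow p by factors of 10 while p*10 <= x
-- ('0 < p' is only a termination guard: p starts at 1 and only grows, so it is always true)
def pLoop (x p : Int) : Int :=
  if 0 < p ∧ p * 10 ≤ x then pLoop x (p * 10) else p
termination_by (x - p).toNat
decreasing_by omega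

-- second while loop of Source B: while p >= 1, emit x // p % 10 and shrink p
def msbLoop (x p : Int) : List Int :=
  if 1 ≤ p then
    PySem.Int.mod (PySem.Int.floordiv x p) 10 :: msbLoop x (PySem.Int.floordiv p 10)
  else []
termination_by p.toNat
decreasing_by
  rw [PySem.Int.floordiv_eq_ediv_of_pos (by norm_num : (0:Int) < 10)]
  omega

def nextKey_alt (x : Int) : List Int :=
  let ds := if x < 10 then [x] else msbLoop x (pLoop x 1)
  let pad := List.replicate (8 - ds.length) 0 ++ ds
  let fb := PySem.Int.bxor (PySem.Int.bxor (PySem.Int.bxor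
              (PySem.List.pyGetD pad 7 0) (PySem.List.pyGetD pad 5 0))
              (PySem.List.pyGetD pad 3 0)) (PySem.List.pyGetD pad 2 0)
  -- pad[:len(pad)-1]: pad is nonempty, so len(pad)-1 ≥ 0 and the slice is an exact take
  fb :: pad.take (pad.length - 1)

-- ===== PRECONDITION & SPEC =====
def Spec_nextKey (x : Int) (out : List Int) : Prop := out = nextKey_alt x
instance (x : Int) (out : List Int) : Decidable (Spec_nextKey x out) := by unfold Spec_nextKey; infer_instance

-- ===== CLAIM (what is proved, stated in full; the proofs are below) =====
def Claim_equal_nextKey : Prop := ∀ (x : Int), Dom_nextKey x → Spec_nextKey x (nextKey x)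

-- ===== LEMMAS AND PROOFS =====

theorem msbLoop_pos (x p : Int) (h : 1 ≤ p) :
    msbLoop x p =
      PySem.Int.mod (PySem.Int.floordiv x p) 10 :: msbLoop x (PySem.Int.floordiv p 10) := by
  rw [msbLoop, if_pos h]

theorem msbLoop_zero (x : Int) : msbLoop x 0 = [] := by
  rw [msbLoop, if_neg (by norm_num)]

theorem pLoop_spec : ∀ (x p : Int), 0 < p → p ≤ x → (∃ k : ℕ, p = 10 ^ k) →
    ∃ m : ℕ, pLoop x p = 10 ^ m ∧ 10 ^ m ≤ x ∧ x < 10 ^ (m + 1) := by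
  intro x p
  induction p using pLoop.induct x with
  | case1 p h ih =>
      intro hp hpx ⟨k, hk⟩
      rw [pLoop, if_pos h]
      exact ih (by omega) h.2 ⟨k + 1, by rw [hk]; ring⟩
  | case2 p h =>
      intro hp hpx ⟨k, hk⟩
      rw [pLoop, if_neg h]
      refine ⟨k, hk, hk ▸ hpx, ?_⟩
      have hx : ¬ p * 10 ≤ x := by tauto
      rw [hk] at hx
      calc x < 10 ^ k * 10 := by omega
        _ = 10 ^ (k + 1) := by ring

theorem fd10 (a : Int) : PySem.Int.floordiv a 10 = a / 10 :=
  PySem.Int.floordiv_eq_ediv_of_pos (by norm_num)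

theorem msbLoop_shift (k : ℕ) (x : Int) :
    msbLoop x (10 ^ (k + 1)) = msbLoop (x / 10) (10 ^ k) ++ [PySem.Int.mod x 10] := by
  induction k generalizing x with
  | zero =>
      have e1 : PySem.Int.floordiv (10:Int) 10 = 1 := by rw [fd10]; norm_num
      have e0 : PySem.Int.floordiv (1:Int) 10 = 0 := by rw [fd10]; norm_num
      have ex : PySem.Int.floordiv x 1 = x := by
        rw [PySem.Int.floordiv_eq_ediv_of_pos (by norm_num : (0:Int) < 1)]; simp
      have exq : PySem.Int.floordiv (x / 10) 1 = x / 10 := by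
        rw [PySem.Int.floordiv_eq_ediv_of_pos (by norm_num : (0:Int) < 1)]; simp
      norm_num
      rw [msbLoop_pos x 10 (by norm_num), e1, msbLoop_pos x 1 (by norm_num), e0, ex,
        msbLoop_zero, msbLoop_pos (x / 10) 1 (by norm_num), e0, exq, msbLoop_zero, fd10]
      simp
  | succ k ih =>
      have hpow : (0:Int) < 10 ^ (k + 1 + 1) := by positivity
      have hpow' : (0:Int) < 10 ^ (k + 1) := by positivity
      have hdiv : PySem.Int.floordiv (10 ^ (k + 1 + 1) : Int) 10 = 10 ^ (k + 1) := by
        rw [fd10, pow_succ]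
        exact Int.mul_ediv_cancel _ (by norm_num)
      have hdiv' : PySem.Int.floordiv (10 ^ (k + 1) : Int) 10 = 10 ^ k := by
        rw [fd10, pow_succ]
        exact Int.mul_ediv_cancel _ (by norm_num)
      rw [msbLoop_pos x _ (by omega : (1:Int) ≤ 10 ^ (k + 1 + 1)), hdiv, ih,
        msbLoop_pos (x / 10) _ (by omega : (1:Int) ≤ 10 ^ (k + 1)), hdiv']
      have hhead : PySem.Int.floordiv x (10 ^ (k + 1 + 1)) =
          PySem.Int.floordiv (x / 10) (10 ^ (k + 1)) := by
        rw [PySem.Int.floordiv_eq_ediv_of_pos hpow,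
            PySem.Int.floordiv_eq_ediv_of_pos hpow',
            Int.ediv_ediv_of_nonneg (by norm_num : (0:Int) ≤ 10),
            show (10:Int) * 10 ^ (k + 1) = 10 ^ (k + 1 + 1) by ring]
      rw [hhead]
      simp

theorem msbLoop_eq_aLista : ∀ (m : ℕ) (x : Int), (10:Int) ^ m ≤ x → x < 10 ^ (m + 1) →
    msbLoop x (10 ^ m) = aLista x := by
  intro m
  induction m with
  | zero =>
      intro x h1 h2
      norm_num at h1 h2
      have ex : PySem.Int.floordiv x 1 = x := by
        rw [PySem.Int.floordiv_eq_ediv_of_pos (by norm_num : (0:Int) < 1)]; simp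
      have e0 : PySem.Int.floordiv (1:Int) 10 = 0 := by rw [fd10]; norm_num
      rw [show ((10:Int) ^ 0) = 1 by norm_num,
        msbLoop_pos x 1 (by norm_num), e0, ex, msbLoop_zero,
        aLista, if_pos (by omega),
        PySem.Int.mod_eq_emod_of_pos (by norm_num : (0:Int) < 10),
        Int.emod_eq_of_lt (by omega) (by omega)]
  | succ m ih =>
      intro x h1 h2
      have h10 : (10:Int) ≤ 10 ^ (m + 1) := by
        calc (10:Int) = 10 ^ 1 := by norm_num
          _ ≤ 10 ^ (m + 1) := pow_le_pow_right₀ (by norm_num) (by omega)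
      rw [msbLoop_shift, aLista, if_neg (by omega), fd10]
      congr 1
      apply ih
      · rw [Int.le_ediv_iff_mul_le (by norm_num : (0:Int) < 10)]
        calc (10:Int) ^ m * 10 = 10 ^ (m + 1) := by ring
          _ ≤ x := h1
      · rw [Int.ediv_lt_iff_lt_mul (by norm_num : (0:Int) < 10)]
        calc x < 10 ^ (m + 1 + 1) := h2
          _ = 10 ^ (m + 1) * 10 := by ring

theorem digits_eq (x : Int) :
    (if x < 10 then [x] else msbLoop x (pLoop x 1)) = aLista x := by
  by_cases h : x < 10
  · rw [if_pos h, aLista, if_pos h]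
  · rw [if_neg h]
    obtain ⟨m, hm, h1, h2⟩ :=
      pLoop_spec x 1 (by norm_num) (by omega) ⟨0, by norm_num⟩
    rw [hm]
    exact msbLoop_eq_aLista m x h1 h2

-- ===== VERDICT (by name: the statement is the Claim_ definition above) =====
theorem nextKey_spec : Claim_equal_nextKey := by
  intro x _
  show nextKey x = nextKey_alt x
  simp only [nextKey, nextKey_alt, digits_eq, PySem.List.slice_to_neg_one,
    List.dropLast_eq_take]
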